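-- pv_equiv track=rewrite | github.com/Shriram-Vasudevan/scoped-agent-control | src/scoped_control/annotations/spans.py | infer_surface_span
-- ===== SOURCE A (Python) =====
-- from typing import Sequence
--
-- def infer_surface_span(lines: Sequence[str], start_index: int, stop_index: int) -> int:
--     """Infer the annotated block end using simple indentation and blank-line heuristics."""
--
--     base_indent = _indentation(lines[start_index])
--     last_non_blank = start_index
--     bracket_depth = _bracket_delta(lines[start_index])
--
--     index = start_index + 1
--     while index < stop_index:
--         line = lines[index]
--         stripped = line.strip()
--
--         if not stripped:
--             next_non_blank = _find_next_non_blank(lines, index + 1, stop_index)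
--             if next_non_blank is None:
--                 break
--             if bracket_depth <= 0 and _indentation(lines[next_non_blank]) <= base_indent:
--                 break
--             index += 1
--             continue
--
--         if bracket_depth <= 0 and _indentation(line) < base_indent:
--             break
--
--         bracket_depth += _bracket_delta(line)
--         last_non_blank = index
--         index += 1
--
--     return last_non_blank
--
-- def _find_next_non_blank(lines: Sequence[str], start: int, stop: int) -> int | None:
--     for index in range(start, stop):
--         if lines[index].strip():
--             return index
--     return None
--
-- def _indentation(line: str) -> int:
--     return len(line) - len(line.lstrip(" \t"))
--
-- def _bracket_delta(line: str) -> int: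
--     opens = sum(line.count(ch) for ch in "([{")
--     closes = sum(line.count(ch) for ch in ")]}")
--     return opens - closes
-- ===== SOURCE B (Python) =====
-- def infer_surface_span(lines, start_index, stop_index):
--     """Infer the annotated block end: scan only the significant (non-blank) lines."""
--     base_indent = _line_indent(lines[start_index])
--     significant = [j for j in range(start_index + 1, stop_index) if lines[j].strip()]
--     depth = _net_brackets(lines[start_index])
--     last = start_index
--     for j in significant:
--         indent = _line_indent(lines[j])
--         if depth <= 0 and (indent <= base_indent if j > last + 1 else indent < base_indent):
--             break
--         depth += _net_brackets(lines[j])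
--         last = j
--     return last
--
-- def _line_indent(line):
--     count = 0
--     for ch in line:
--         if ch not in " \t":
--             break
--         count += 1
--     return count
--
-- def _net_brackets(line):
--     depth = 0
--     for ch in line:
--         if ch in "([{":
--             depth += 1
--         elif ch in ")]}":
--             depth -= 1
--     return depth
-- ===== Notes on version B (the rewrite author's own statement) =====
-- stated objective: alternative
-- what changed: Replaces A's index-by-index while loop with its inner look-ahead scan for the next non-blank line by a single pass over the prebuilt list of significant (non-blank) line indices, folding the blank-gap look-ahead into a 'j > last + 1' test and per-character helper passes.
-- outside the precondition, e.g. on infer_surface_span(['    a', 'b'], 0, 5): A returns 0, B raises IndexError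
import Mathlib
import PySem

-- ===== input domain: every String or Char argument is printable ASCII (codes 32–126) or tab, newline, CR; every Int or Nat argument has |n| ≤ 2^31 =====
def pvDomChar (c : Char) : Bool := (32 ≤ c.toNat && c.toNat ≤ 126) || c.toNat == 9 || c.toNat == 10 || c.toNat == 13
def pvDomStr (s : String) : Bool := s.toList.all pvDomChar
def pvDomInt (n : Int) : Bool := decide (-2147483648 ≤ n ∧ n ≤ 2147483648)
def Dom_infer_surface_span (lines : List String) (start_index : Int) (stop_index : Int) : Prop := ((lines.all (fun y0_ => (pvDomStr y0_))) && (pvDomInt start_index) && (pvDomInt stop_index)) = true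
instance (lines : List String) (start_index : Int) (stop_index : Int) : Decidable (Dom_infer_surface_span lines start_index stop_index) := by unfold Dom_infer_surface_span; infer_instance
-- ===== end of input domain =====

-- B replaces A's index-by-index while loop (with its inner look-ahead scan for the next
-- non-blank line) by one pass over the prebuilt list of significant (non-blank) line
-- indices, folding the blank-gap look-ahead into a single `j > last + 1` test; same
-- return value on every input admitted by Pre_ (objective: alternative decomposition).

-- ===== PORT A =====
-- _indentation(line) = len(line) - len(line.lstrip(" \t")); lstrip(" \t") ported by hand
-- as dropWhile over the code points (exact: lstrip removes exactly the leading run).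
def infIndentA (line : String) : Int :=
  (line.toList.length : Int) -
    ((line.toList.dropWhile (fun c => c == ' ' || c == '\t')).length : Int)

-- _bracket_delta(line): sum of `line.count(ch)` over "([{" minus the same over ")]}".
def infDeltaA (line : String) : Int :=
  ((PySem.Str.count line "(" + PySem.Str.count line "[" + PySem.Str.count line "{" : Nat) : Int)
  - ((PySem.Str.count line ")" + PySem.Str.count line "]" + PySem.Str.count line "}" : Nat) : Int)

-- _find_next_non_blank: first index in range(start, stop) whose line strips non-empty.
-- (out-of-range access is given default "" — inside Pre_ every access is in range)
def infFindNext (lines : List String) (start stop : Int) : Option Int :=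
  (PySem.List.pyRange start stop 1).find?
    (fun i => PySem.Str.strip (PySem.List.pyGetD lines i "") != "")

-- the while loop; fuel = stop_index - index counts the remaining iterations
def infLoopA (lines : List String) (stop base : Int) :
    Nat → Int → Int → Int → Int
  | 0, _index, last, _depth => last
  | fuel + 1, index, last, depth =>
    let line := PySem.List.pyGetD lines index ""
    if PySem.Str.strip line == "" then
      match infFindNext lines (index + 1) stop with
      | none => last
      | some nb =>
        if depth ≤ 0 ∧ infIndentA (PySem.List.pyGetD lines nb "") ≤ base then last
        else infLoopA lines stop base fuel (index + 1) last depth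
    else if depth ≤ 0 ∧ infIndentA line < base then last
    else infLoopA lines stop base fuel (index + 1) index (depth + infDeltaA line)

def infer_surface_span (lines : List String) (start_index : Int) (stop_index : Int) : Int :=
  let startLine := PySem.List.pyGetD lines start_index ""
  infLoopA lines stop_index (infIndentA startLine)
    (stop_index - (start_index + 1)).toNat (start_index + 1) start_index (infDeltaA startLine)

-- ===== PORT B =====
-- _line_indent: count the leading run of " \t" characters directly.
def infIndentBgo : List Char → Int → Int
  | [], n => n
  | c :: rest, n => if c == ' ' || c == '\t' then infIndentBgo rest (n + 1) else n

def infIndentB (line : String) : Int := infIndentBgo line.toList 0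

-- _net_brackets: one pass over the characters, ±1 per bracket.
def infDeltaB (line : String) : Int :=
  line.toList.foldl
    (fun d c =>
      if c == '(' || c == '[' || c == '{' then d + 1
      else if c == ')' || c == ']' || c == '}' then d - 1
      else d) 0

def infLoopB (lines : List String) (base : Int) : List Int → Int → Int → Int
  | [], last, _depth => last
  | j :: rest, last, depth =>
    let ind := infIndentB (PySem.List.pyGetD lines j "")
    if depth ≤ 0 ∧ (if j > last + 1 then ind ≤ base else ind < base) then last
    else infLoopB lines base rest j (depth + infDeltaB (PySem.List.pyGetD lines j ""))

def infer_surface_span_alt (lines : List String) (start_index : Int) (stop_index : Int) : Int :=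
  let startLine := PySem.List.pyGetD lines start_index ""
  let significant := (PySem.List.pyRange (start_index + 1) stop_index 1).filter
    (fun j => PySem.Str.strip (PySem.List.pyGetD lines j "") != "")
  infLoopB lines (infIndentB startLine) significant start_index (infDeltaB startLine)

-- ===== PRECONDITION & SPEC =====
-- Pre_ excludes out-of-range start_index and stop_index > len(lines): there A raises
-- IndexError, except on inputs where an incidental early break happens to precede the
-- out-of-range access (see the cite in claim.json; B raises on those too).
def Pre_infer_surface_span (lines : List String) (start_index : Int) (stop_index : Int) : Prop :=
  -(lines.length : Int) ≤ start_index ∧ start_index < (lines.length : Int) ∧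
    stop_index ≤ (lines.length : Int)
instance (lines : List String) (start_index : Int) (stop_index : Int) : Decidable (Pre_infer_surface_span lines start_index stop_index) := by unfold Pre_infer_surface_span; infer_instance

def pvWitness_infer_surface_span : List String × Int × Int :=
  (["def f():", "    x = (1,", "  2)", "", "    y = 3", "z = 4"], 0, 6)

def Spec_infer_surface_span (lines : List String) (start_index : Int) (stop_index : Int) (out : Int) : Prop := out = infer_surface_span_alt lines start_index stop_index
instance (lines : List String) (start_index : Int) (stop_index : Int) (out : Int) : Decidable (Spec_infer_surface_span lines start_index stop_index out) := by unfold Spec_infer_surface_span; infer_instance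

-- ===== CLAIM (what is proved, stated in full; the proofs are below) =====
def Claim_equal_infer_surface_span : Prop := ∀ (lines : List String) (start_index : Int) (stop_index : Int), Dom_infer_surface_span lines start_index stop_index → Pre_infer_surface_span lines start_index stop_index → Spec_infer_surface_span lines start_index stop_index (infer_surface_span lines start_index stop_index)

-- ===== LEMMAS AND PROOFS =====

-- B's leading-run counter equals A's len − len(lstrip)
theorem infIndentBgo_eq (cs : List Char) : ∀ n : Int,
    infIndentBgo cs n =
      n + ((cs.length : Int) - ((cs.dropWhile (fun c => c == ' ' || c == '\t')).length : Int)) := by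
  induction cs with
  | nil => intro n; simp [infIndentBgo]
  | cons c rest ih =>
    intro n
    by_cases h : (c == ' ' || c == '\t') = true
    · simp [infIndentBgo, h, ih]; omega
    · simp [infIndentBgo, h]

theorem infIndentB_eq (line : String) : infIndentB line = infIndentA line := by
  simp [infIndentB, infIndentA, infIndentBgo_eq]

-- PySem.Chars.count with a single-character needle is List.count
theorem count_go_singleton (c : Char) : ∀ (l : List Char) (fuel acc : Nat),
    l.length ≤ fuel → PySem.Chars.count.go [c] fuel l acc = acc + l.count c := by
  intro l
  induction l with
  | nil => intro fuel acc _; cases fuel <;> simp [PySem.Chars.count.go]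
  | cons a rest ih =>
    intro fuel acc hf
    simp only [List.length_cons] at hf
    cases fuel with
    | zero => omega
    | succ f =>
      by_cases h : c = a
      · subst h
        have hp : [c].isPrefixOf (c :: rest) = true := by simp [List.isPrefixOf]
        simp only [PySem.Chars.count.go, hp, if_true, List.length_cons, List.length_nil,
          Nat.zero_add, List.drop_one, List.tail_cons]
        rw [ih f (acc + 1) (by omega)]
        simp
        omega
      · have hp : [c].isPrefixOf (a :: rest) = false := by
          simp [List.isPrefixOf]; exact fun hh => (h hh).elim
        simp only [PySem.Chars.count.go, hp, Bool.false_eq_true, if_false]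
        rw [ih f acc (by omega)]
        have : (a == c) = false := by simpa using fun hh => h hh.symm
        simp [List.count_cons, this]

theorem count_singleton (s : List Char) (c : Char) :
    PySem.Chars.count s [c] = s.count c := by
  simp [PySem.Chars.count, count_go_singleton c s s.length 0 le_rfl]

theorem infDeltaB_go_eq (cs : List Char) : ∀ d : Int,
    cs.foldl
      (fun d c =>
        if c == '(' || c == '[' || c == '{' then d + 1
        else if c == ')' || c == ']' || c == '}' then d - 1
        else d) d
    = d + ((cs.count '(' + cs.count '[' + cs.count '{' : Nat) : Int)
        - ((cs.count ')' + cs.count ']' + cs.count '}' : Nat) : Int) := by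
  induction cs with
  | nil => intro d; simp
  | cons c rest ih =>
    intro d
    simp only [List.foldl_cons, ih]
    by_cases ho : (c == '(' || c == '[' || c == '{') = true
    · rw [if_pos ho]
      have h : c = '(' ∨ c = '[' ∨ c = '{' := by
        simp only [Bool.or_eq_true, beq_iff_eq, or_assoc] at ho; exact ho
      rcases h with h | h | h <;> subst h <;> simp <;> ring
    · rw [if_neg ho]
      by_cases hc : (c == ')' || c == ']' || c == '}') = true
      · rw [if_pos hc]
        have h : c = ')' ∨ c = ']' ∨ c = '}' := by
          simp only [Bool.or_eq_true, beq_iff_eq, or_assoc] at hc; exact hc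
        rcases h with h | h | h <;> subst h <;> simp <;> ring
      · rw [if_neg hc]
        have o1 : ¬ c = '(' := fun h => ho (by simp [h])
        have o2 : ¬ c = '[' := fun h => ho (by simp [h])
        have o3 : ¬ c = '{' := fun h => ho (by simp [h])
        have c1 : ¬ c = ')' := fun h => hc (by simp [h])
        have c2 : ¬ c = ']' := fun h => hc (by simp [h])
        have c3 : ¬ c = '}' := fun h => hc (by simp [h])
        simp [o1, o2, o3, c1, c2, c3]

theorem infDeltaB_eq (line : String) : infDeltaB line = infDeltaA line := by
  unfold infDeltaB infDeltaA
  rw [infDeltaB_go_eq]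
  simp only [pysem]
  rw [show ("(" : String).toList = ['('] from rfl, show ("[" : String).toList = ['['] from rfl,
    show ("{" : String).toList = ['{'] from rfl, show (")" : String).toList = [')'] from rfl,
    show ("]" : String).toList = [']'] from rfl, show ("}" : String).toList = ['}'] from rfl]
  simp only [count_singleton]
  push_cast
  ring

-- A's look-ahead scan is the head of B's significant-index list
theorem infFindNext_eq (lines : List String) (a b : Int) :
    infFindNext lines a b =
      ((PySem.List.pyRange a b 1).filter
        (fun j => PySem.Str.strip (PySem.List.pyGetD lines j "") != "")).head? := by
  simp [infFindNext, List.head?_filter]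

-- core correspondence between the two loops
theorem infLoop_eq (lines : List String) (stop base : Int) :
    ∀ (fuel : Nat) (index last depth : Int),
      fuel = (stop - index).toNat → last < index →
      ((PySem.Str.strip (PySem.List.pyGetD lines index "") != "") = true →
        last + 1 < index →
        ¬ (depth ≤ 0 ∧ infIndentA (PySem.List.pyGetD lines index "") ≤ base)) →
      infLoopA lines stop base fuel index last depth =
        infLoopB lines base
          ((PySem.List.pyRange index stop 1).filter
            (fun j => PySem.Str.strip (PySem.List.pyGetD lines j "") != ""))
          last depth := by
  intro fuel
  induction fuel generalizing lines stop base with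
  | zero =>
    intro index last depth hf _ _
    have : stop ≤ index := by omega
    simp [infLoopA, PySem.List.pyRange_one_eq_nil this, infLoopB]
  | succ f ih =>
    intro index last depth hf hlt hH
    have hix : index < stop := by omega
    rw [PySem.List.pyRange_one_cons hix]
    by_cases hb : (PySem.Str.strip (PySem.List.pyGetD lines index "") != "") = true
    · -- index is significant: kept by the filter
      have hbeq : (PySem.Str.strip (PySem.List.pyGetD lines index "") == "") = false := by
        simpa [bne] using hb
      rw [List.filter_cons_of_pos (p := fun j => PySem.Str.strip (PySem.List.pyGetD lines j "") != "") hb]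
      rw [infLoopA, infLoopB]
      simp only [hbeq, Bool.false_eq_true, if_false, infIndentB_eq, infDeltaB_eq]
      by_cases hgap : last + 1 < index
      · -- blank gap before index: H says neither loop breaks here
        have hnA : ¬ (depth ≤ 0 ∧ infIndentA (PySem.List.pyGetD lines index "") < base) := by
          intro ⟨h1, h2⟩; exact hH hb hgap ⟨h1, le_of_lt h2⟩
        rw [if_neg hnA, if_neg (by
          intro ⟨h1, h2⟩
          rw [if_pos (by omega)] at h2
          exact hH hb hgap ⟨h1, h2⟩)]
        exact ih lines stop base (index + 1) index _ (by omega) (by omega)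
          (fun _ h => absurd h (by omega))
      · -- contiguous: identical strict test
        have hif : (if last + 1 < index then
            infIndentA (PySem.List.pyGetD lines index "") ≤ base
          else infIndentA (PySem.List.pyGetD lines index "") < base)
            = (infIndentA (PySem.List.pyGetD lines index "") < base) := by
          rw [if_neg hgap]
        simp only [hif]
        by_cases hc : depth ≤ 0 ∧ infIndentA (PySem.List.pyGetD lines index "") < base
        · rw [if_pos hc, if_pos hc]
        · rw [if_neg hc, if_neg hc]
          exact ih lines stop base (index + 1) index _ (by omega) (by omega)
            (fun _ h => absurd h (by omega))
    · -- index is blank: dropped by the filter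
      have hbeq : (PySem.Str.strip (PySem.List.pyGetD lines index "") == "") = true := by
        simpa [bne] using hb
      rw [List.filter_cons_of_neg (p := fun j => PySem.Str.strip (PySem.List.pyGetD lines j "") != "") hb]
      rw [infLoopA]
      simp only [hbeq, if_true]
      rw [infFindNext_eq]
      rcases hnb : ((PySem.List.pyRange (index + 1) stop 1).filter
          (fun j => PySem.Str.strip (PySem.List.pyGetD lines j "") != "")).head? with _ | nb
      · -- no later non-blank line: A breaks, B's list is empty
        rw [List.head?_eq_none_iff] at hnb
        simp [hnb, infLoopB]
      · -- nb = next non-blank line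
        dsimp only
        obtain ⟨rest, hrest⟩ : ∃ rest, (PySem.List.pyRange (index + 1) stop 1).filter
            (fun j => PySem.Str.strip (PySem.List.pyGetD lines j "") != "") = nb :: rest := by
          cases hl : (PySem.List.pyRange (index + 1) stop 1).filter
              (fun j => PySem.Str.strip (PySem.List.pyGetD lines j "") != "") with
          | nil => rw [hl] at hnb; simp at hnb
          | cons x xs => rw [hl] at hnb; simp at hnb; exact ⟨xs, by rw [hnb]⟩
        have hnbmem : nb ∈ PySem.List.pyRange (index + 1) stop 1 := by
          have : nb ∈ (PySem.List.pyRange (index + 1) stop 1).filter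
              (fun j => PySem.Str.strip (PySem.List.pyGetD lines j "") != "") := by
            rw [hrest]; exact List.mem_cons_self
          exact List.mem_of_mem_filter this
        have hnbge : index + 1 ≤ nb := ((PySem.List.mem_pyRange_one).mp hnbmem).1
        by_cases hbrk : depth ≤ 0 ∧ infIndentA (PySem.List.pyGetD lines nb "") ≤ base
        · -- A breaks at the blank; B breaks at nb (gap test gives ≤)
          rw [if_pos hbrk, hrest, infLoopB]
          rw [if_pos (by
            constructor
            · exact hbrk.1
            · rw [if_pos (by omega), infIndentB_eq]; exact hbrk.2)]
        · -- neither breaks; recurse past the blank line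
          rw [if_neg hbrk]
          have hnext : (PySem.Str.strip (PySem.List.pyGetD lines (index + 1) "") != "") = true →
              last + 1 < index + 1 →
              ¬ (depth ≤ 0 ∧ infIndentA (PySem.List.pyGetD lines (index + 1) "") ≤ base) := by
            intro hsig _
            -- then index+1 itself is the first significant line, i.e. nb = index + 1
            have hi1 : index + 1 < stop := by
              by_contra hge
              rw [PySem.List.pyRange_one_eq_nil (by omega)] at hrest
              simp at hrest
            have : nb = index + 1 := by
              rw [PySem.List.pyRange_one_cons hi1, List.filter_cons_of_pos (p := fun j => PySem.Str.strip (PySem.List.pyGetD lines j "") != "") hsig] at hrest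
              exact (List.cons.injEq _ _ _ _ ▸ hrest).1.symm
            rw [← this]; exact hbrk
          exact ih lines stop base (index + 1) last depth (by omega) (by omega) hnext

-- ===== VERDICT (by name: the statement is the Claim_ definition above) =====
theorem infer_surface_span_spec : Claim_equal_infer_surface_span := by
  intro lines s e _hdom _hpre
  unfold Spec_infer_surface_span infer_surface_span infer_surface_span_alt
  simp only [infIndentB_eq, infDeltaB_eq]
  exact infLoop_eq lines e _ _ (s + 1) s _ rfl (by omega)
    (fun _ h => absurd h (by omega))
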